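-- pv_equiv track=rewrite | github.com/Lucas-Israel/Exerc-cios-trybe | computer_science/secao-estrutura-de-dados/dia-03-arrays/exercicios/exercicio3.py | good_product
-- ===== SOURCE A (Python) =====
-- def good_product(arr):
--     to_send = 0
--     arr_len = len(arr)
--     for i in range(arr_len):
--         for i2 in range(i + 1, arr_len):
--             if arr[i] == arr[i2]:
--                 to_send += 1
--     return to_send
-- ===== SOURCE B (Python) =====
-- def good_product(arr):
--     counts = {}
--     for x in arr:
--         counts[x] = counts.get(x, 0) + 1
--     return sum(c * (c - 1) // 2 for c in counts.values())
-- ===== Notes on version B (the rewrite author's own statement) =====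
-- stated objective: faster
-- what changed: Replaces the O(n^2) double loop over index pairs with a single-pass frequency map followed by summing c*(c-1)//2 per distinct value.
import Mathlib
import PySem

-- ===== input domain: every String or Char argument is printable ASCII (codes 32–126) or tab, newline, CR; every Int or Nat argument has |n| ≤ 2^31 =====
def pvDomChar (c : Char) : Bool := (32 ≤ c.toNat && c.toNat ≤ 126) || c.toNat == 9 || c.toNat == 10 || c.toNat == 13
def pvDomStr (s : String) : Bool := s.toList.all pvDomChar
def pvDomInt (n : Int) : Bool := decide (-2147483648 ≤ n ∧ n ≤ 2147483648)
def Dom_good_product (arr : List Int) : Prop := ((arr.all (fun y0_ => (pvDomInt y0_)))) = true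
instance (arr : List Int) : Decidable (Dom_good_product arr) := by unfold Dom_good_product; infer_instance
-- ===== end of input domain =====

-- B replaces A's O(n^2) double loop over index pairs with a one-pass frequency map and sums c*(c-1)//2 per distinct value (faster).

-- ===== PORT A =====
def good_product (arr : List Int) : Int :=
  (PySem.List.pyRange 0 (arr.length : Int) 1).foldl
    (fun to_send i =>
      (PySem.List.pyRange (i + 1) (arr.length : Int) 1).foldl
        (fun acc i2 =>
          if PySem.List.pyGetD arr i 0 = PySem.List.pyGetD arr i2 0 then acc + 1 else acc)
        to_send)
    0

-- ===== PORT B =====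
def good_product_alt (arr : List Int) : Int :=
  let counts : PySem.Dict Int Int := arr.foldl (fun d x => d.insert x (d.getD x 0 + 1)) PySem.Dict.empty
  (counts.values.map (fun c => PySem.Int.floordiv (c * (c - 1)) 2)).sum

-- ===== PRECONDITION & SPEC =====
def Spec_good_product (arr : List Int) (out : Int) : Prop := out = good_product_alt arr
instance (arr : List Int) (out : Int) : Decidable (Spec_good_product arr out) := by unfold Spec_good_product; infer_instance

-- ===== CLAIM (what is proved, stated in full; the proofs are below) =====
def Claim_equal_good_product : Prop := ∀ (arr : List Int), Dom_good_product arr → Spec_good_product arr (good_product arr)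

-- ===== LEMMAS AND PROOFS =====

/-- `c*(c-1)//2`, the per-value pair count of B. -/
def pvH (c : Int) : Int := PySem.Int.floordiv (c * (c - 1)) 2

/-- The common reference function: pairs (i,j), i<j, with equal values. -/
def pvF : List Int → Int
  | [] => 0
  | x :: l => (l.count x : Int) + pvF l

lemma pvH_succ (c : Int) : pvH (c + 1) = pvH c + c := by
  obtain ⟨k, hk⟩ := Int.even_mul_succ_self (c - 1)
  have e1 : c * (c - 1) = 2 * k := by
    have h := mul_comm c (c - 1)
    have : (c - 1) * (c - 1 + 1) = (c - 1) * c := by ring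
    rw [this] at hk
    rw [h, hk]; ring
  have e2 : (c + 1) * (c + 1 - 1) = 2 * (k + c) := by
    have : (c + 1) * (c + 1 - 1) = c * (c - 1) + 2 * c := by ring
    rw [this, e1]; ring
  unfold pvH PySem.Int.floordiv
  rw [e1, e2, Int.mul_fdiv_cancel_left _ (by norm_num), Int.mul_fdiv_cancel_left _ (by norm_num)]

lemma pvH_one : pvH 1 = 0 := by decide

lemma pvCountFoldl (x : Int) : ∀ (l : List Int) (acc : Int),
    l.foldl (fun a v => if x = v then a + 1 else a) acc = acc + (l.count x : Int) := by
  intro l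
  induction l with
  | nil => intro acc; simp
  | cons v l ih =>
    intro acc
    by_cases h : x = v
    · subst h
      simp [List.foldl_cons, ih]
      omega
    · rw [List.foldl_cons, if_neg h, ih acc]
      simp [List.count_cons]
      exact fun hh => h hh.symm

lemma pvInner (arr : List Int) (k : Nat) (acc : Int) :
    (PySem.List.pyRange ((0 + (k : Int)) + 1) (arr.length : Int) 1).foldl
      (fun a i2 => if PySem.List.pyGetD arr (0 + (k : Int)) 0 = PySem.List.pyGetD arr i2 0 then a + 1 else a)
      acc
    = acc + ((arr.drop (k + 1)).count (arr.getD k 0) : Int) := by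
  have hidx : (0 + (k : Int)) = ((k : Nat) : Int) := by omega
  rw [hidx, PySem.List.pyGetD_natCast]
  rw [PySem.List.foldl_pyRange_pyGetD' arr 0
      (fun a v => if arr.getD k 0 = v then a + 1 else a) acc (a := ((k : Int)) + 1) (by omega)]
  have ht : (((k : Int)) + 1).toNat = k + 1 := by omega
  rw [ht, pvCountFoldl]

lemma pvFoldlAdd (g : Nat → Int) : ∀ (l : List Nat) (acc : Int),
    l.foldl (fun a k => a + g k) acc = acc + (l.map g).sum := by
  intro l
  induction l with
  | nil => intro acc; simp
  | cons k l ih => intro acc; simp [List.foldl_cons, ih]; ring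

lemma pvA_eq_sum (arr : List Int) :
    good_product arr
      = ((List.range arr.length).map (fun k => ((arr.drop (k + 1)).count (arr.getD k 0) : Int))).sum := by
  unfold good_product
  rw [PySem.List.pyRange_one]
  have hb : (((arr.length : Int) - 0)).toNat = arr.length := by omega
  rw [hb, List.foldl_map]
  have hbody : (fun (acc : Int) (k : Nat) =>
      (PySem.List.pyRange ((0 + (k : Int)) + 1) (arr.length : Int) 1).foldl
        (fun a i2 => if PySem.List.pyGetD arr (0 + (k : Int)) 0 = PySem.List.pyGetD arr i2 0 then a + 1 else a)
        acc)
      = fun (acc : Int) (k : Nat) => acc + ((arr.drop (k + 1)).count (arr.getD k 0) : Int) := by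
    funext acc k
    exact pvInner arr k acc
  rw [hbody, pvFoldlAdd]
  simp

lemma pvSum_eq_pvF (arr : List Int) :
    ((List.range arr.length).map (fun k => ((arr.drop (k + 1)).count (arr.getD k 0) : Int))).sum
      = pvF arr := by
  induction arr with
  | nil => simp [pvF]
  | cons x l ih =>
    rw [List.length_cons, List.range_succ_eq_map]
    simp only [List.map_cons, List.map_map, List.sum_cons]
    have : ((List.range l.length).map
        ((fun k => (((x :: l).drop (k + 1)).count ((x :: l).getD k 0) : Int)) ∘ Nat.succ))
        = (List.range l.length).map (fun k => ((l.drop (k + 1)).count (l.getD k 0) : Int)) := by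
      apply List.map_congr_left
      intro k _
      simp [Function.comp, List.drop_succ_cons]
    rw [this, ih]
    simp [pvF]

lemma pvB_eq_setsum (arr : List Int) :
    good_product_alt arr
      = ((PySem.Set.ofList arr).map (fun v => pvH ((List.count v arr : Int)))).sum := by
  unfold good_product_alt
  rw [PySem.Dict.foldl_insert_getD_add_one_eq_counter]
  simp only [PySem.Dict.values, PySem.Dict.items_counter, List.map_map]
  rfl

lemma pvF_append (x : Int) : ∀ (xs : List Int), pvF (xs ++ [x]) = pvF xs + (xs.count x : Int) := by
  intro xs
  induction xs with
  | nil => simp [pvF]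
  | cons y ys ih =>
    show pvF (y :: (ys ++ [x])) = pvF (y :: ys) + ((y :: ys).count x : Int)
    by_cases h : x = y
    · subst h
      simp [pvF, ih, List.count_append]
      ring
    · simp [pvF, ih, List.count_append, h, eq_comm]
      ring

lemma pvSumUpdate (x : Int) (f f' : Int → Int) (d : Int) (hx' : f' x = f x + d) :
    ∀ S : List Int, S.Nodup → x ∈ S → (∀ v ∈ S, v ≠ x → f' v = f v) →
      (S.map f').sum = (S.map f).sum + d := by
  intro S
  induction S with
  | nil => intro _ hx _; cases hx
  | cons a S ih =>
    intro hnd hx hagree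
    rcases List.nodup_cons.mp hnd with ⟨ha, hnd'⟩
    by_cases hax : a = x
    · subst hax
      have heq : S.map f' = S.map f := by
        apply List.map_congr_left
        intro v hv
        exact hagree v (List.mem_cons_of_mem _ hv) (by rintro rfl; exact ha hv)
      simp [heq, hx']; ring
    · have hx2 : x ∈ S := by
        rcases List.mem_cons.mp hx with h | h
        · exact absurd h.symm hax
        · exact h
      have hrec := ih hnd' hx2 (fun v hv hne => hagree v (List.mem_cons_of_mem _ hv) hne)
      have hhead : f' a = f a := hagree a (List.mem_cons_self) hax
      simp [hrec, hhead]; ring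

lemma pvSet_eq_pvF : ∀ (arr : List Int),
    ((PySem.Set.ofList arr).map (fun v => pvH ((List.count v arr : Int)))).sum = pvF arr := by
  intro arr
  induction arr using List.reverseRecOn with
  | nil => simp [pvF, PySem.Set.ofList]
  | append_singleton xs x ih =>
    rw [pvF_append, ← ih, PySem.Set.ofList_append_singleton]
    by_cases hx : x ∈ xs
    · have hadd : (PySem.Set.ofList xs).add x = PySem.Set.ofList xs := by
        simp [PySem.Set.add, PySem.Set.contains, PySem.Set.mem_ofList, hx]
      rw [hadd]
      apply pvSumUpdate x (fun v => pvH ((List.count v xs : Int)))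
        (fun v => pvH ((List.count v (xs ++ [x]) : Int))) ((xs.count x : Int))
      · have hc : List.count x (xs ++ [x]) = List.count x xs + 1 := by
          simp [List.count_append]
        rw [hc]
        push_cast
        exact pvH_succ _
      · exact PySem.Set.nodup_ofList xs
      · exact (PySem.Set.mem_ofList _ _).mpr hx
      · intro v _ hvx
        have : List.count v (xs ++ [x]) = List.count v xs := by
          simp [List.count_append, Ne.symm hvx]
        rw [this]
    · have hadd : (PySem.Set.ofList xs).add x = PySem.Set.ofList xs ++ [x] := by
        simp [PySem.Set.add, PySem.Set.contains, PySem.Set.mem_ofList, hx]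
      rw [hadd, List.map_append, List.sum_append]
      have h0 : xs.count x = 0 := List.count_eq_zero.mpr hx
      have hrest : (PySem.Set.ofList xs).map (fun v => pvH ((List.count v (xs ++ [x]) : Int)))
          = (PySem.Set.ofList xs).map (fun v => pvH ((List.count v xs : Int))) := by
        apply List.map_congr_left
        intro v hv
        have hvx : v ≠ x := by
          rintro rfl
          exact hx ((PySem.Set.mem_ofList _ _).mp hv)
        have : List.count v (xs ++ [x]) = List.count v xs := by
          simp [List.count_append, Ne.symm hvx]
        rw [this]
      rw [hrest]
      simp [h0, pvH_one]

-- ===== VERDICT (by name: the statement is the Claim_ definition above) =====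
theorem good_product_spec : Claim_equal_good_product := by
  intro arr _
  show good_product arr = good_product_alt arr
  rw [pvA_eq_sum, pvSum_eq_pvF, pvB_eq_setsum, pvSet_eq_pvF]
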